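-- pv_equiv track=rewrite | github.com/GawainTheCoder/light-upwork-scraper | linkedin_finder/find_linkedins_cse.py | pick_best_linkedin_candidate
-- ===== SOURCE A (Python) =====
-- from typing import Any, Dict, Iterable, List, Optional, Tuple
--
-- def pick_best_linkedin_candidate(full_name: str, first_name: str, loc_tokens: List[str],
--                                 skill_tokens: List[str], candidates: List[Dict[str, str]],
--                                 role_tokens: Optional[List[str]] = None) -> Optional[Dict[str, str]]:
--   """Improved candidate selection with better scoring for LinkedIn profiles."""
--   fn = first_name.lower()
--   full_name_lower = full_name.lower()
--   role_tokens = role_tokens or []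
--
--   best_candidate = None
--   best_score = 0
--
--   for cand in candidates:
--     title = (cand.get("title") or "").lower()
--     snippet = (cand.get("snippet") or "").lower()
--     url = (cand.get("url") or "").lower()
--     combined_text = f"{title} {snippet}"
--
--     score = 0
--
--     # Name matching (most important)
--     if fn in title:
--       score += 3
--
--       # Bonus for multiple name parts matching
--       name_parts = full_name_lower.split()
--       if len(name_parts) > 1:
--         matching_parts = sum(1 for part in name_parts if len(part) > 1 and part in combined_text)
--         if matching_parts >= 2:
--           score += 4  # Strong signal for full name match
--         elif matching_parts == 1 and len(name_parts[1]) > 2: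
--           score += 1
--     else:
--       continue  # Skip if first name not in title
--
--     # Location matching
--     location_matches = sum(1 for t in loc_tokens if t.lower() in combined_text)
--     if location_matches > 0:
--       score += min(location_matches * 2, 4)
--
--     # Professional context
--     if any(k in combined_text for k in ["freelancer", "upwork", "consultant", "self employed"]):
--       score += 2
--
--     # URL pattern matching
--     if any(part in url for part in full_name_lower.split() if len(part) > 2):
--       score += 2
--     elif url.startswith("https://www.linkedin.com/in/" + fn):
--       score += 1
--
--     # Skills/role matching
--     if role_tokens and any(t.lower() in combined_text for t in role_tokens):
--       score += 1
--     if skill_tokens and any(t.lower() in combined_text for t in skill_tokens):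
--       score += 1
--
--     if score > best_score:
--       best_score = score
--       best_candidate = cand
--
--   # Return best candidate if score is reasonable
--   return best_candidate if best_score >= 5 else None
-- ===== SOURCE B (Python) =====
-- def pick_best_linkedin_candidate(full_name, first_name, loc_tokens,
--                                  skill_tokens, candidates, role_tokens=None):
--   """Bucket selection: scores are bounded (0..17), so instead of tracking a running
--   best we record the FIRST candidate for each score in a dict keyed by score and
--   then scan the buckets downward from 17 to the acceptance threshold 5."""
--   fn = first_name.lower()
--   name_parts = full_name.lower().split()
--   rts = role_tokens or []
--
--   def score(cand):
--     title = (cand.get("title") or "").lower()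
--     if fn not in title:
--       return 0
--     text = title + " " + (cand.get("snippet") or "").lower()
--     url = (cand.get("url") or "").lower()
--     m = sum(1 for p in name_parts if len(p) > 1 and p in text)
--     lm = sum(1 for t in loc_tokens if t.lower() in text)
--     parts = [
--       3,
--       ((4 if m >= 2 else (1 if m == 1 and len(name_parts[1]) > 2 else 0))
--        if len(name_parts) > 1 else 0),
--       (min(lm * 2, 4) if lm > 0 else 0),
--       (2 if any(k in text for k in ["freelancer", "upwork", "consultant", "self employed"]) else 0),
--       (2 if any(p in url for p in name_parts if len(p) > 2)
--        else (1 if url.startswith("https://www.linkedin.com/in/" + fn) else 0)),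
--       (1 if rts and any(t.lower() in text for t in rts) else 0),
--       (1 if skill_tokens and any(t.lower() in text for t in skill_tokens) else 0),
--     ]
--     return sum(parts)
--
--   first_by_score = {}
--   for c in candidates:
--     first_by_score.setdefault(score(c), c)
--
--   for s in range(17, 4, -1):   # 17 = maximum attainable score, 5 = acceptance threshold
--     if s in first_by_score:
--       return first_by_score[s]
--   return None
-- ===== Notes on version B (the rewrite author's own statement) =====
-- stated objective: alternative
-- what changed: Comparison-based selection (A's running best_score/best_candidate accumulator) is replaced by bucket selection: scoring is a pure helper returning a sum of bonus parts, the first candidate attaining each score is recorded in a dict keyed by score (scores are bounded by 17), and the buckets are scanned downward from 17 to the threshold 5, returning the first hit; no score is ever compared with another.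
import Mathlib
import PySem

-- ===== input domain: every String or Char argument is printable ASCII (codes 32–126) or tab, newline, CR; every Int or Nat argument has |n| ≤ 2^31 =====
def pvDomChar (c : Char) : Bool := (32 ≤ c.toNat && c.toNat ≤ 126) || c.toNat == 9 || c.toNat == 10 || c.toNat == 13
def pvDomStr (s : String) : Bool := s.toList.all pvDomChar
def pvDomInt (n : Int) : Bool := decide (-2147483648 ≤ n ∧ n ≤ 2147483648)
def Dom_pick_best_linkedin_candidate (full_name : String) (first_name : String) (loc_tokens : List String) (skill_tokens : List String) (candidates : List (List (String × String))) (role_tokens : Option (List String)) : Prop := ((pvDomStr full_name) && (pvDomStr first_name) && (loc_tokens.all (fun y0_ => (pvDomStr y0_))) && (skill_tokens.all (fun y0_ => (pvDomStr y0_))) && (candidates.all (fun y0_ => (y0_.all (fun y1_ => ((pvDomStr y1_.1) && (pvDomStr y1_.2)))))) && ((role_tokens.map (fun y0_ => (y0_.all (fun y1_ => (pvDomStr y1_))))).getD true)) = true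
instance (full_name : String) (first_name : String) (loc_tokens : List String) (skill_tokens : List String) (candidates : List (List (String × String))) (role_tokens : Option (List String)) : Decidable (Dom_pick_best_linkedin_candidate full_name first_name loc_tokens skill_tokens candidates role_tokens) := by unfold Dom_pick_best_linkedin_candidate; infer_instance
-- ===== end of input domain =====

-- B replaces A's comparison-based running-best loop by bucket selection: a pure score helper
-- (sum of bonus parts), a dict recording the first candidate per score, and a downward scan
-- of the buckets from 17 (the maximum attainable score) to the threshold 5 (objective: alternative).

-- ===== PORT A =====
-- cand.get(k) or "" : first-match association-list lookup, defaulting to "" (exact: "or" turns None into "", keeps any non-empty string, and "" stays "")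
def pvGetStr (cand : List (String × String)) (k : String) : String :=
  (List.lookup k cand).getD ""

-- the body of A's for-loop, as a fold step over the state (best_candidate, best_score)
def pvStepA (fn : String) (full_name_lower : String) (loc_tokens skill_tokens rts : List String)
    (st : Option (List (String × String)) × Int) (cand : List (String × String)) :
    Option (List (String × String)) × Int :=
  let title := PySem.Str.lower (pvGetStr cand "title")
  let snippet := PySem.Str.lower (pvGetStr cand "snippet")
  let url := PySem.Str.lower (pvGetStr cand "url")
  let combined_text := title ++ " " ++ snippet
  if PySem.Str.isIn fn title then
    let score : Int := 3
    let name_parts := PySem.Str.split₀ full_name_lower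
    let score :=
      if 1 < name_parts.length then
        let matching_parts : Int :=
          (name_parts.filter (fun part => decide (1 < PySem.Str.len part) && PySem.Str.isIn part combined_text)).length
        if 2 ≤ matching_parts then score + 4
        else if matching_parts = 1 ∧ 2 < PySem.Str.len ((PySem.List.pyGet? name_parts 1).getD "") then score + 1
        else score
      else score
    let location_matches : Int :=
      (loc_tokens.filter (fun t => PySem.Str.isIn (PySem.Str.lower t) combined_text)).length
    let score := if 0 < location_matches then score + min (location_matches * 2) 4 else score
    let score :=
      if ["freelancer", "upwork", "consultant", "self employed"].any (fun k => PySem.Str.isIn k combined_text)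
      then score + 2 else score
    let score :=
      if (PySem.Str.split₀ full_name_lower).any (fun part => decide (2 < PySem.Str.len part) && PySem.Str.isIn part url)
      then score + 2
      else if PySem.Str.startswith url ("https://www.linkedin.com/in/" ++ fn) then score + 1 else score
    let score :=
      if ¬ rts.isEmpty ∧ rts.any (fun t => PySem.Str.isIn (PySem.Str.lower t) combined_text)
      then score + 1 else score
    let score :=
      if ¬ skill_tokens.isEmpty ∧ skill_tokens.any (fun t => PySem.Str.isIn (PySem.Str.lower t) combined_text)
      then score + 1 else score
    if st.2 < score then (some cand, score) else st
  else st  -- continue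

def pick_best_linkedin_candidate (full_name : String) (first_name : String) (loc_tokens : List String) (skill_tokens : List String) (candidates : List (List (String × String))) (role_tokens : Option (List String)) : Option (List (String × String)) :=
  let fn := PySem.Str.lower first_name
  let full_name_lower := PySem.Str.lower full_name
  let rts := role_tokens.getD []  -- role_tokens or [] (None → [], [] → [])
  let st := candidates.foldl (pvStepA fn full_name_lower loc_tokens skill_tokens rts) (none, 0)
  if 5 ≤ st.2 then st.1 else none

-- ===== PORT B =====
-- B's pure score helper: 0 when the first name is not in the title, else the sum of the bonus parts
def pvScoreCand (fn : String) (name_parts loc_tokens skill_tokens rts : List String)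
    (cand : List (String × String)) : Int :=
  let title := PySem.Str.lower ((List.lookup "title" cand).getD "")
  if ¬ PySem.Str.isIn fn title then 0 else
  let text := title ++ " " ++ PySem.Str.lower ((List.lookup "snippet" cand).getD "")
  let url := PySem.Str.lower ((List.lookup "url" cand).getD "")
  let m : Int := (name_parts.filter (fun part => decide (1 < PySem.Str.len part) && PySem.Str.isIn part text)).length
  let lm : Int := (loc_tokens.filter (fun t => PySem.Str.isIn (PySem.Str.lower t) text)).length
  ([3,
    (if 1 < name_parts.length then
       (if 2 ≤ m then 4
        else if m = 1 ∧ 2 < PySem.Str.len ((PySem.List.pyGet? name_parts 1).getD "") then 1 else 0)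
     else 0),
    (if 0 < lm then min (lm * 2) 4 else 0),
    (if ["freelancer", "upwork", "consultant", "self employed"].any (fun k => PySem.Str.isIn k text) then 2 else 0),
    (if name_parts.any (fun part => decide (2 < PySem.Str.len part) && PySem.Str.isIn part url) then 2
     else if PySem.Str.startswith url ("https://www.linkedin.com/in/" ++ fn) then 1 else 0),
    (if ¬ rts.isEmpty ∧ rts.any (fun t => PySem.Str.isIn (PySem.Str.lower t) text) then 1 else 0),
    (if ¬ skill_tokens.isEmpty ∧ skill_tokens.any (fun t => PySem.Str.isIn (PySem.Str.lower t) text) then 1 else 0)] : List Int).sum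

def pick_best_linkedin_candidate_alt (full_name : String) (first_name : String) (loc_tokens : List String) (skill_tokens : List String) (candidates : List (List (String × String))) (role_tokens : Option (List String)) : Option (List (String × String)) :=
  let fn := PySem.Str.lower first_name
  let name_parts := PySem.Str.split₀ (PySem.Str.lower full_name)
  let rts := role_tokens.getD []
  -- first_by_score.setdefault(score(c), c) over the candidates
  let first_by_score := candidates.foldl
    (fun d c => PySem.Dict.setdefault d (pvScoreCand fn name_parts loc_tokens skill_tokens rts c) c)
    PySem.Dict.empty
  -- for s in range(17, 4, -1): if s in first_by_score: return first_by_score[s]  (first some wins)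
  (PySem.List.pyRange 17 4 (-1)).findSome? (fun s => PySem.Dict.get? first_by_score s)

-- ===== PRECONDITION & SPEC =====
def Spec_pick_best_linkedin_candidate (full_name : String) (first_name : String) (loc_tokens : List String) (skill_tokens : List String) (candidates : List (List (String × String))) (role_tokens : Option (List String)) (out : Option (List (String × String))) : Prop := out = pick_best_linkedin_candidate_alt full_name first_name loc_tokens skill_tokens candidates role_tokens
instance (full_name : String) (first_name : String) (loc_tokens : List String) (skill_tokens : List String) (candidates : List (List (String × String))) (role_tokens : Option (List String)) (out : Option (List (String × String))) : Decidable (Spec_pick_best_linkedin_candidate full_name first_name loc_tokens skill_tokens candidates role_tokens out) := by unfold Spec_pick_best_linkedin_candidate; infer_instance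

-- ===== CLAIM (what is proved, stated in full; the proofs are below) =====
def Claim_equal_pick_best_linkedin_candidate : Prop := ∀ (full_name : String) (first_name : String) (loc_tokens : List String) (skill_tokens : List String) (candidates : List (List (String × String))) (role_tokens : Option (List String)), Dom_pick_best_linkedin_candidate full_name first_name loc_tokens skill_tokens candidates role_tokens → Spec_pick_best_linkedin_candidate full_name first_name loc_tokens skill_tokens candidates role_tokens (pick_best_linkedin_candidate full_name first_name loc_tokens skill_tokens candidates role_tokens)

-- ===== LEMMAS AND PROOFS =====

theorem pvScoreCand_nonneg (fn : String) (np lt st rts : List String) (cand : List (String × String)) :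
    0 ≤ pvScoreCand fn np lt st rts cand := by
  simp only [pvScoreCand, List.sum_cons, List.sum_nil]
  split_ifs <;> omega

theorem pvScoreCand_le (fn : String) (np lt st rts : List String) (cand : List (String × String)) :
    pvScoreCand fn np lt st rts cand ≤ 17 := by
  simp only [pvScoreCand, List.sum_cons, List.sum_nil]
  split_ifs <;> omega

theorem pvAddIf (c : Prop) [Decidable c] (s k : Int) :
    (if c then s + k else s) = s + (if c then k else 0) := by split_ifs <;> omega

theorem pvAddIf2 (c c2 c3 : Prop) [Decidable c] [Decidable c2] [Decidable c3] (s : Int) :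
    (if c then (if c2 then s + 4 else if c3 then s + 1 else s) else s)
      = s + (if c then (if c2 then 4 else if c3 then 1 else 0) else 0) := by split_ifs <;> omega

theorem pvAddIf3 (c c2 : Prop) [Decidable c] [Decidable c2] (s k1 k2 : Int) :
    (if c then s + k1 else if c2 then s + k2 else s)
      = s + (if c then k1 else if c2 then k2 else 0) := by split_ifs <;> omega

-- the incremental score chain (A's shape) against the component sum (B's shape), over atomic conditions
theorem pvChainEq (bc : Option (List (String × String))) (bs : Int)
    (cand : List (String × String)) (hbs : 0 ≤ bs)
    (t : Bool) (c1 : Prop) [Decidable c1] (m : Int) (c2b : Prop) [Decidable c2b]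
    (lm : Int) (c4 : Bool) (c5 : Bool) (c5b : Bool) (c6 : Prop) [Decidable c6] (c7 : Prop) [Decidable c7] :
    (if t then
       (let score : Int := 3
        let score := if c1 then (if 2 ≤ m then score + 4 else if m = 1 ∧ c2b then score + 1 else score) else score
        let score := if 0 < lm then score + min (lm * 2) 4 else score
        let score := if c4 then score + 2 else score
        let score := if c5 then score + 2 else if c5b then score + 1 else score
        let score := if c6 then score + 1 else score
        let score := if c7 then score + 1 else score
        if bs < score then (some cand, score) else (bc, bs))
     else (bc, bs)) =
    (let S : Int := if ¬ t then 0 else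
       ([3, (if c1 then (if 2 ≤ m then 4 else if m = 1 ∧ c2b then 1 else 0) else 0),
         (if 0 < lm then min (lm * 2) 4 else 0),
         (if c4 then 2 else 0),
         (if c5 then 2 else if c5b then 1 else 0),
         (if c6 then 1 else 0),
         (if c7 then 1 else 0)] : List Int).sum
     if bs < S then (some cand, S) else (bc, bs)) := by
  cases t
  · have h0 : ¬ bs < (0 : Int) := by omega
    simp [h0]
  · simp only [List.sum_cons, List.sum_nil, not_true, if_true, if_false]
    rw [pvAddIf c7, pvAddIf c6, pvAddIf3 (c5 = true) (c5b = true), pvAddIf (c4 = true),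
        pvAddIf (0 < lm), pvAddIf2 c1 (2 ≤ m) (m = 1 ∧ c2b)]
    have hsum : ∀ a b c d e f' : Int,
        3 + a + b + c + d + e + f' = 3 + (a + (b + (c + (d + (e + (f' + 0)))))) := by
      intros; ring
    rw [hsum]

theorem pvStepA_eq (fn fnl : String) (lt sk rts : List String)
    (bc : Option (List (String × String))) (bs : Int) (cand : List (String × String)) (hbs : 0 ≤ bs) :
    pvStepA fn fnl lt sk rts (bc, bs) cand =
      (if bs < pvScoreCand fn (PySem.Str.split₀ fnl) lt sk rts cand
       then (some cand, pvScoreCand fn (PySem.Str.split₀ fnl) lt sk rts cand)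
       else (bc, bs)) :=
  pvChainEq bc bs cand hbs _ _ _ _ _ _ _ _ _ _

-- the track-best fold: final score = running max, final candidate = first candidate attaining it
theorem foldSel {C : Type} (f : C → Int) (l : List C) (bc : Option C) (bs : Int) :
    l.foldl (fun st c => if st.2 < f c then (some c, f c) else st) (bc, bs) =
      ((if bs < l.foldl (fun a c => max a (f c)) bs
        then l.find? (fun c => f c == l.foldl (fun a c => max a (f c)) bs)
        else bc),
       l.foldl (fun a c => max a (f c)) bs) := by
  induction l generalizing bc bs with
  | nil => simp
  | cons c t ih =>
    simp only [List.foldl_cons, List.find?]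
    by_cases h : bs < f c
    · have hmax : max bs (f c) = f c := by omega
      rw [if_pos h, ih, hmax]
      have hle : f c ≤ t.foldl (fun a c => max a (f c)) (f c) :=
        (PySem.List.le_foldl_max_int t f (f c)).1
      by_cases h2 : f c < t.foldl (fun a c => max a (f c)) (f c)
      · have hne : (f c == t.foldl (fun a c => max a (f c)) (f c)) = false := by
          simp; omega
        simp only [hne, if_pos h2, if_pos (by omega : bs < t.foldl (fun a c => max a (f c)) (f c))]
      · have heq : f c = t.foldl (fun a c => max a (f c)) (f c) := by omega
        simp only [← heq, beq_self_eq_true, if_pos (by omega : bs < f c)]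
        simp
    · have hmax : max bs (f c) = bs := by omega
      rw [if_neg h, ih, hmax]
      by_cases h2 : bs < t.foldl (fun a c => max a (f c)) bs
      · have hne : (f c == t.foldl (fun a c => max a (f c)) bs) = false := by
          simp; omega
        simp only [hne, if_pos h2]
      · simp only [if_neg h2]

-- A's fold (with the 'continue' skip) is the uniform track-best fold over pvScoreCand
theorem foldA_eq (fn fnl : String) (lt sk rts : List String) (l : List (List (String × String)))
    (bc : Option (List (String × String))) (bs : Int) (hbs : 0 ≤ bs) :
    l.foldl (pvStepA fn fnl lt sk rts) (bc, bs) =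
      l.foldl (fun st c => if st.2 < pvScoreCand fn (PySem.Str.split₀ fnl) lt sk rts c
                           then (some c, pvScoreCand fn (PySem.Str.split₀ fnl) lt sk rts c) else st) (bc, bs) := by
  induction l generalizing bc bs with
  | nil => rfl
  | cons c t ih =>
    simp only [List.foldl_cons]
    rw [pvStepA_eq fn fnl lt sk rts bc bs c hbs]
    by_cases h : bs < pvScoreCand fn (PySem.Str.split₀ fnl) lt sk rts c
    · rw [if_pos h]
      exact ih (some c) _ (by have := pvScoreCand_nonneg fn (PySem.Str.split₀ fnl) lt sk rts c; omega)
    · rw [if_neg h]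
      exact ih bc bs hbs

-- the setdefault loop builds the first-candidate-per-score index
theorem dict_fold_get {C : Type} (f : C → Int) (l : List C) (d : PySem.Dict Int C) (s : Int) :
    PySem.Dict.get? (l.foldl (fun d c => PySem.Dict.setdefault d (f c) c) d) s =
      (match PySem.Dict.get? d s with
       | some v => some v
       | none => l.find? (fun c => f c == s)) := by
  induction l generalizing d with
  | nil =>
    simp only [List.foldl_nil, List.find?_nil]
    cases PySem.Dict.get? d s <;> rfl
  | cons c t ih =>
    simp only [List.foldl_cons, List.find?]
    rw [ih]
    by_cases hc : PySem.Dict.contains d (f c) = true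
    · rw [PySem.Dict.setdefault_of_contains _ _ hc]
      by_cases hfc : f c = s
      · subst hfc
        have : (PySem.Dict.get? d (f c)).isSome := by
          rw [← PySem.Dict.contains_eq_isSome_get?]; exact hc
        obtain ⟨v, hv⟩ := Option.isSome_iff_exists.mp this
        simp [hv]
      · have : (f c == s) = false := by simp [hfc]
        simp [this]
    · have hc' : PySem.Dict.contains d (f c) = false := by
        cases h : PySem.Dict.contains d (f c) <;> simp_all
      rw [PySem.Dict.setdefault_of_not_contains _ _ hc']
      by_cases hfc : f c = s
      · subst hfc
        have hnone : PySem.Dict.get? d (f c) = none := by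
          have h2 := PySem.Dict.contains_eq_isSome_get? d (f c)
          rw [hc'] at h2
          cases hg : PySem.Dict.get? d (f c) with
          | none => rfl
          | some v => rw [hg] at h2; simp at h2
        rw [PySem.Dict.get?_insert_self, hnone]
        simp
      · rw [PySem.Dict.get?_insert_of_ne _ _ (fun h => hfc h.symm)]
        have : (f c == s) = false := by simp [hfc]
        simp [this]

-- a downward scan over a strictly decreasing list stops at the highest nonempty bucket
theorem scanDown {C : Type} (g : Int → Option C) (l : List Int) (M : Int)
    (hmem : M ∈ l) (hpair : l.Pairwise (fun a b => b < a))
    (hnone : ∀ s ∈ l, M < s → g s = none) (hsome : (g M).isSome) :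
    l.findSome? g = g M := by
  induction l with
  | nil => cases hmem
  | cons a t ih =>
    rcases List.mem_cons.mp hmem with h | h
    · subst h
      obtain ⟨v, hv⟩ := Option.isSome_iff_exists.mp hsome
      simp [List.findSome?, hv]
    · have haM : M < a := (List.pairwise_cons.mp hpair).1 M h
      have ha : g a = none := hnone a (List.mem_cons_self) haM
      simp only [List.findSome?, ha]
      exact ih h (List.pairwise_cons.mp hpair).2 (fun s hs => hnone s (List.mem_cons_of_mem a hs))

theorem scanNone {C : Type} (g : Int → Option C) (l : List Int)
    (h : ∀ s ∈ l, g s = none) : l.findSome? g = none := by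
  induction l with
  | nil => rfl
  | cons a t ih =>
    simp only [List.findSome?, h a List.mem_cons_self]
    exact ih (fun s hs => h s (List.mem_cons_of_mem a hs))

-- range(17, 4, -1) is the literal descending list 17..5
theorem pyRange17 : PySem.List.pyRange 17 4 (-1) = [17,16,15,14,13,12,11,10,9,8,7,6,5] := by decide

-- the running max over scores: either 0 (never beaten) or attained by some candidate
theorem max_attained {C : Type} (f : C → Int) (l : List C) :
    l.foldl (fun a c => max a (f c)) 0 = 0 ∨ ∃ c ∈ l, f c = l.foldl (fun a c => max a (f c)) 0 := by
  have h := PySem.List.foldl_max_mem (l.map f) 0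
  rw [List.foldl_map] at h
  rcases h with h | h
  · exact Or.inl h
  · right
    obtain ⟨c, hc, hfc⟩ := List.mem_map.mp h
    exact ⟨c, hc, hfc⟩

-- ===== VERDICT (by name: the statement is the Claim_ definition above) =====
theorem pick_best_linkedin_candidate_spec : Claim_equal_pick_best_linkedin_candidate := by
  intro full_name first_name loc_tokens skill_tokens candidates role_tokens _
  unfold Spec_pick_best_linkedin_candidate
  simp only [pick_best_linkedin_candidate, pick_best_linkedin_candidate_alt]
  set fn := PySem.Str.lower first_name
  set np := PySem.Str.split₀ (PySem.Str.lower full_name) with hnp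
  set rts := role_tokens.getD []
  set f := pvScoreCand fn np loc_tokens skill_tokens rts with hf
  rw [foldA_eq fn (PySem.Str.lower full_name) loc_tokens skill_tokens rts candidates none 0 le_rfl]
  rw [← hnp, ← hf, foldSel]
  set M := candidates.foldl (fun a c => max a (f c)) 0 with hM
  have hub : ∀ c ∈ candidates, f c ≤ M :=
    (PySem.List.le_foldl_max_int candidates f 0).2
  have hget : ∀ s : Int,
      PySem.Dict.get? (candidates.foldl (fun d c => PySem.Dict.setdefault d (f c) c) PySem.Dict.empty) s
        = candidates.find? (fun c => f c == s) := by
    intro s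
    rw [dict_fold_get f candidates PySem.Dict.empty s]
    simp [PySem.Dict.get?_empty]
  by_cases h5 : 5 ≤ M
  · rw [if_pos h5, if_pos (by omega : (0:Int) < M)]
    rcases max_attained f candidates with h0 | ⟨c, hc, hfc⟩
    · omega
    · have heq : f c = M := by rw [hM]; exact hfc
      have hMle : M ≤ 17 := by
        have := pvScoreCand_le fn np loc_tokens skill_tokens rts c
        rw [← hf] at this; omega
      have hsome : (candidates.find? (fun c => f c == M)).isSome :=
        List.find?_isSome.mpr ⟨c, hc, by simp [heq]⟩
      have := scanDown
        (fun s => PySem.Dict.get? (candidates.foldl (fun d c => PySem.Dict.setdefault d (f c) c) PySem.Dict.empty) s)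
        (PySem.List.pyRange 17 4 (-1)) M
        (by rw [pyRange17]; have h17 : M ≤ 17 := hMle
            simp only [List.mem_cons, List.not_mem_nil, or_false]; omega)
        (by rw [pyRange17]; decide)
        (by intro s _ hMs
            dsimp only
            rw [hget s]
            rw [List.find?_eq_none]
            intro c' hc'
            have := hub c' hc'
            simp; omega)
        (by dsimp only; rw [hget M]; exact hsome)
      rw [this]
      exact (hget M).symm
  · rw [if_neg h5]
    rw [scanNone]
    intro s hs
    dsimp only
    rw [hget s, List.find?_eq_none]
    intro c' hc'
    have hle := hub c' hc'
    rw [hM] at hle h5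
    have hs5 : 5 ≤ s := by
      rw [pyRange17] at hs
      simp only [List.mem_cons, List.not_mem_nil, or_false] at hs
      omega
    simp; omega
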